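-- pv_equiv track=rewrite | github.com/Aizpunr/TyO-Rankings | build_tyo.py | assign_placements
-- ===== SOURCE A (Python) =====
-- from collections import defaultdict, Counter
--
-- def assign_placements(state, lobby_sids):
--     survivors = [s for s in lobby_sids if not state[s]['eliminated']]
--     eliminated = [s for s in lobby_sids if state[s]['eliminated']]
--     placements = {s: 1 for s in survivors}
--     by_round = defaultdict(list)
--     for s in eliminated:
--         by_round[state[s]['elim_round']].append(s)
--     next_rank = len(survivors) + 1
--     for r in sorted(by_round.keys(), reverse=True):
--         bucket = by_round[r]
--         for s in bucket:
--             placements[s] = next_rank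
--         next_rank += len(bucket)
--     return placements
-- ===== SOURCE B (Python) =====
-- def assign_placements(state, lobby_sids):
--     placements = {}
--     eliminated = []
--     for s in lobby_sids:
--         if state[s]['eliminated']:
--             eliminated.append(s)
--         else:
--             placements[s] = 1
--     base = 1 + len(lobby_sids) - len(eliminated)
--     rounds = [state[s]['elim_round'] for s in eliminated]
--     for s in sorted(eliminated, key=lambda t: -state[t]['elim_round']):
--         placements[s] = base + sum(1 for x in rounds if x > state[s]['elim_round'])
--     return placements
-- ===== Notes on version B (the rewrite author's own statement) =====
-- stated objective: alternative
-- what changed: Instead of bucketing eliminated players into a defaultdict keyed by round and walking the distinct rounds in descending order with a running next_rank counter, B makes one pass splitting survivors from eliminated, sorts the eliminated once by descending elimination round (stable), and computes each player's rank directly by the closed formula 1 + #survivors + #(players eliminated in a strictly later round).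
import Mathlib
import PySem

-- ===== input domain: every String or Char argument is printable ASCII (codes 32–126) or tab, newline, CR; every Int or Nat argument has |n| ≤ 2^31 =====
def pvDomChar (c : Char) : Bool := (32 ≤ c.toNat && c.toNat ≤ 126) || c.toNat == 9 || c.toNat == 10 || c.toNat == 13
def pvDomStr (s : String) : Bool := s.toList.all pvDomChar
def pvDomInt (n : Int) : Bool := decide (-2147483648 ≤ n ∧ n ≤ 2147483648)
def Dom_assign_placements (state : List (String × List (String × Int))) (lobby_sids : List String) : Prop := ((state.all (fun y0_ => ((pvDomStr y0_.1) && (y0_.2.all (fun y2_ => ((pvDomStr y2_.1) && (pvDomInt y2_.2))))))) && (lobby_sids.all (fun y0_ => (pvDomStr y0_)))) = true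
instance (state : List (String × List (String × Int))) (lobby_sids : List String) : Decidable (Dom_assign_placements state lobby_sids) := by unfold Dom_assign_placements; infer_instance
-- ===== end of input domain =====

-- B replaces A's round-bucketing dict and running rank counter by one survivors/eliminated
-- split, a single stable sort of the eliminated by descending round, and a direct counting
-- formula for each rank (objective: alternative decomposition, not faster).

-- ===== PORT A =====
-- shared accessors for the Python expressions state[s] / state[s]['eliminated'] / state[s]['elim_round']
def pvInner (state : List (String × List (String × Int))) (s : String) : PySem.Dict String Int :=
  PySem.Dict.mk ((PySem.Dict.mk state).getD s [])

def pvElim (state : List (String × List (String × Int))) (s : String) : Int :=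
  (pvInner state s).getD "eliminated" 0

def pvRound (state : List (String × List (String × Int))) (s : String) : Int :=
  (pvInner state s).getD "elim_round" 0

def assign_placements (state : List (String × List (String × Int))) (lobby_sids : List String) : List (String × Int) :=
  let survivors := lobby_sids.filter (fun s => !(pvElim state s != 0))
  let eliminated := lobby_sids.filter (fun s => pvElim state s != 0)
  let placements : PySem.Dict String Int :=
    survivors.foldl (fun d s => d.insert s 1) (PySem.Dict.mk [])
  let by_round : PySem.Dict Int (List String) :=
    eliminated.foldl (fun d s => d.modify (pvRound state s) [] (fun b => b ++ [s])) (PySem.Dict.mk [])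
  let final := (PySem.List.sorted by_round.keys (fun r => r) true).foldl
    (fun (acc : PySem.Dict String Int × Int) r =>
      let bucket := by_round.getD r []
      (bucket.foldl (fun d s => d.insert s acc.2) acc.1, acc.2 + (bucket.length : Int)))
    (placements, (survivors.length : Int) + 1)
  final.1.items

-- ===== PORT B =====
def assign_placements_alt (state : List (String × List (String × Int))) (lobby_sids : List String) : List (String × Int) :=
  let pe := lobby_sids.foldl
    (fun (acc : PySem.Dict String Int × List String) s =>
      if pvElim state s != 0 then (acc.1, acc.2 ++ [s]) else (acc.1.insert s 1, acc.2))
    (PySem.Dict.mk [], [])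
  let eliminated := pe.2
  let base : Int := 1 + (lobby_sids.length : Int) - (eliminated.length : Int)
  let rounds := eliminated.map (fun s => pvRound state s)
  let final := (PySem.List.sorted eliminated (fun t => -(pvRound state t)) false).foldl
    (fun d s => d.insert s (base + (rounds.countP (fun x => pvRound state s < x) : Int))) pe.1
  final.items

-- ===== PRECONDITION & SPEC =====
-- Pre_ excludes exactly the inputs where the Python raises KeyError: a lobby sid missing from
-- state, an entry without 'eliminated', or an eliminated entry without 'elim_round'.
def Pre_assign_placements (state : List (String × List (String × Int))) (lobby_sids : List String) : Prop :=
  ∀ s ∈ lobby_sids,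
    (PySem.Dict.mk state).contains s = true ∧
    (pvInner state s).contains "eliminated" = true ∧
    (pvElim state s ≠ 0 → (pvInner state s).contains "elim_round" = true)
instance (state : List (String × List (String × Int))) (lobby_sids : List String) : Decidable (Pre_assign_placements state lobby_sids) := by unfold Pre_assign_placements; infer_instance

def pvWitness_assign_placements : (List (String × List (String × Int))) × List String :=
  ([("a", [("eliminated", 0)]), ("b", [("eliminated", 1), ("elim_round", 2)]),
    ("c", [("eliminated", 1), ("elim_round", 1)])], ["a", "b", "c"])

def Spec_assign_placements (state : List (String × List (String × Int))) (lobby_sids : List String) (out : List (String × Int)) : Prop := out = assign_placements_alt state lobby_sids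
instance (state : List (String × List (String × Int))) (lobby_sids : List String) (out : List (String × Int)) : Decidable (Spec_assign_placements state lobby_sids out) := by unfold Spec_assign_placements; infer_instance

-- ===== CLAIM (what is proved, stated in full; the proofs are below) =====
def Claim_equal_assign_placements : Prop := ∀ (state : List (String × List (String × Int))) (lobby_sids : List String), Dom_assign_placements state lobby_sids → Pre_assign_placements state lobby_sids → Spec_assign_placements state lobby_sids (assign_placements state lobby_sids)


-- ===== LEMMAS AND PROOFS =====

-- B's single split loop computes A's survivors-placements dict and A's eliminated list.
theorem pvLoopB (state : List (String × List (String × Int))) :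
    ∀ (L : List String) (P : PySem.Dict String Int) (l : List String),
      L.foldl (fun (acc : PySem.Dict String Int × List String) s =>
          if pvElim state s != 0 then (acc.1, acc.2 ++ [s]) else (acc.1.insert s 1, acc.2)) (P, l)
      = ((L.filter (fun s => !(pvElim state s != 0))).foldl (fun d s => d.insert s 1) P,
         l ++ L.filter (fun s => pvElim state s != 0)) := by
  intro L
  induction L with
  | nil => simp
  | cons s L ih =>
    intro P l
    simp only [List.foldl_cons, List.filter_cons]
    by_cases h : (pvElim state s != 0) = true
    · rw [if_pos h, ih]
      simp [h]
    · rw [if_neg h, ih]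
      simp [h]

theorem pvLenSplit (state : List (String × List (String × Int))) (L : List String) :
    (L.filter (fun s => !(pvElim state s != 0))).length
      + (L.filter (fun s => pvElim state s != 0)).length = L.length := by
  induction L with
  | nil => simp
  | cons s L ih =>
    by_cases h : pvElim state s != 0
    · simp [h, ← ih]; omega
    · simp at h
      simp [h, ← ih]; omega

-- A's defaultdict bucket for round c is the filter of the eliminated list at round c.
theorem pvByRoundGetD (state : List (String × List (String × Int))) (L : List String) (c : Int) :
    (L.foldl (fun d s => d.modify (pvRound state s) [] (fun b => b ++ [s])) (PySem.Dict.mk [])).getD c []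
      = L.filter (fun s => pvRound state s == c) := by
  have hmap : L.foldl (fun d s => d.modify (pvRound state s) [] (fun b => b ++ [s])) (PySem.Dict.mk [])
      = (L.map (fun s => (pvRound state s, s))).foldl
          (fun d p => d.modify p.1 [] (fun b => b ++ [p.2])) (PySem.Dict.mk []) := by
    rw [List.foldl_map]
  rw [hmap, PySem.Dict.getD_foldl_modify_append]
  have : (PySem.Dict.mk ([] : List (Int × List String))).getD c [] = [] := rfl
  rw [this, List.filter_map, List.map_map]
  simp [Function.comp_def]

theorem pvByRoundKeys (state : List (String × List (String × Int))) (L : List String) :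
    (L.foldl (fun d s => d.modify (pvRound state s) [] (fun b => b ++ [s])) (PySem.Dict.mk [])).keys
      = PySem.Set.ofList (L.map (fun s => pvRound state s)) := by
  rw [PySem.Dict.keys_foldl_modify_key L (fun s => pvRound state s) [] (fun _ s => fun b => b ++ [s])]
  rw [PySem.Set.ofList_eq_foldl]
  rfl

-- insertBy drops x exactly between the not-before prefix and the before suffix.
theorem pvInsertByMiddle {α : Type} (before : α → α → Bool) (x : α) :
    ∀ (A B : List α), (∀ a ∈ A, before x a = false) → (∀ b ∈ B, before x b = true) →
      PySem.List.insertBy before x (A ++ B) = A ++ x :: B := by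
  intro A
  induction A with
  | nil =>
    intro B _ hB
    cases B with
    | nil => rfl
    | cons b B => simp [PySem.List.insertBy, hB b (by simp)]
  | cons a A ih =>
    intro B hA hB
    simp [PySem.List.insertBy, hA a (by simp)]
    exact ih B (fun a' ha' => hA a' (by simp [ha'])) hB

-- Stable sort by descending round = concatenation of the round buckets along any
-- strictly descending key list covering all rounds.
theorem pvSortedFlatMap {α : Type} (r : α → Int) (l : List α) :
    ∀ (K : List Int), K.Pairwise (· > ·) → (∀ s ∈ l, r s ∈ K) →
      PySem.List.sorted l (fun t => -(r t)) false
        = K.flatMap (fun k => l.filter (fun s => r s == k)) := by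
  induction l using List.reverseRecOn with
  | nil => intro K _ _; simp [PySem.List.sorted]
  | append_singleton l x ih =>
    intro K hpw hmem
    have hx : r x ∈ K := hmem x (by simp)
    obtain ⟨K₁, K₂, rfl⟩ := List.append_of_mem hx
    obtain ⟨h1, h23, hcross⟩ := List.pairwise_append.mp hpw
    obtain ⟨hhead, h2⟩ := List.pairwise_cons.mp h23
    have hK₁ : ∀ k ∈ K₁, r x < k := fun k hk => hcross k hk (r x) (by simp)
    have hsnoc : PySem.List.sorted (l ++ [x]) (fun t => -(r t)) false
        = PySem.List.insertBy (fun a b => decide ((fun t => -(r t)) a < (fun t => -(r t)) b)) x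
            (PySem.List.sorted l (fun t => -(r t)) false) := by
      rw [PySem.List.sorted_eq_foldl_insertBy, PySem.List.sorted_eq_foldl_insertBy,
        List.foldl_append, List.foldl_cons, List.foldl_nil]
    rw [hsnoc, ih (K₁ ++ r x :: K₂) hpw (fun s hs => hmem s (by simp [hs]))]
    have hgx : ∀ k, (l ++ [x]).filter (fun s => r s == k)
        = l.filter (fun s => r s == k) ++ (if r x == k then [x] else []) := by
      intro k
      rw [List.filter_append]
      congr 1
      by_cases h : r x == k <;> simp [h]
    have hmid : PySem.List.insertBy (fun a b => decide ((fun t => -(r t)) a < (fun t => -(r t)) b)) x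
        ((K₁.flatMap (fun k => l.filter (fun s => r s == k))
            ++ (l.filter (fun s => r s == r x)))
          ++ K₂.flatMap (fun k => l.filter (fun s => r s == k)))
        = (K₁.flatMap (fun k => l.filter (fun s => r s == k))
            ++ (l.filter (fun s => r s == r x)))
          ++ x :: K₂.flatMap (fun k => l.filter (fun s => r s == k)) := by
      apply pvInsertByMiddle
      · intro a ha
        rcases List.mem_append.mp ha with ha | ha
        · obtain ⟨k, hk, hak⟩ := List.mem_flatMap.mp ha
          have : r a = k := by simpa using (List.mem_filter.mp hak).2
          have := hK₁ k hk
          simp only [decide_eq_false_iff_not]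
          omega
        · have : r a = r x := by simpa using (List.mem_filter.mp ha).2
          simp only [decide_eq_false_iff_not]
          omega
      · intro b hb
        obtain ⟨k, hk, hbk⟩ := List.mem_flatMap.mp hb
        have : r b = k := by simpa using (List.mem_filter.mp hbk).2
        have := hhead k hk
        simp only [decide_eq_true_eq]
        omega
    have hK₁g : K₁.flatMap (fun k => (l ++ [x]).filter (fun s => r s == k))
        = K₁.flatMap (fun k => l.filter (fun s => r s == k)) := by
      apply List.flatMap_congr
      intro k hk
      rw [hgx k]
      have : ¬ (r x == k) = true := by
        have := hK₁ k hk; simp; omega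
      simp [this]
    have hK₂g : K₂.flatMap (fun k => (l ++ [x]).filter (fun s => r s == k))
        = K₂.flatMap (fun k => l.filter (fun s => r s == k)) := by
      apply List.flatMap_congr
      intro k hk
      rw [hgx k]
      have : ¬ (r x == k) = true := by
        have := hhead k hk; simp; omega
      simp [this]
    have hRHS : (K₁ ++ r x :: K₂).flatMap (fun k => (l ++ [x]).filter (fun s => r s == k))
        = (K₁.flatMap (fun k => l.filter (fun s => r s == k))
            ++ (l.filter (fun s => r s == r x)))
          ++ x :: K₂.flatMap (fun k => l.filter (fun s => r s == k)) := by
      rw [List.flatMap_append, List.flatMap_cons, hK₁g, hK₂g, hgx (r x)]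
      simp [List.append_assoc]
    rw [hRHS, List.flatMap_append, List.flatMap_cons, ← List.append_assoc]
    exact hmid

theorem pvCountPDisjoint {α : Type} (l : List α) (p q : α → Bool)
    (h : ∀ x ∈ l, ¬(p x = true ∧ q x = true)) :
    l.countP (fun x => p x || q x) = l.countP p + l.countP q := by
  induction l with
  | nil => simp
  | cons a l ih =>
    have hrest := ih (fun x hx => h x (by simp [hx]))
    by_cases hp : p a = true
    · have hq : ¬ q a = true := fun hq => h a (by simp) ⟨hp, hq⟩
      simp [hp, hq, hrest]; omega
    · by_cases hq : q a = true
      · simp [hp, hq, hrest]; omega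
      · simp [hp, hq, hrest]

-- The running next_rank loop over descending rounds equals B's per-player counting fold.
theorem pvLoopAB (state : List (String × List (String × Int))) (l : List String) (base : Int) :
    ∀ (K : List Int) (P : PySem.Dict String Int) (nr : Int),
      K.Pairwise (· > ·) →
      (∀ x ∈ l.map (fun s => pvRound state s), x ∈ K ∨ ∀ k ∈ K, k < x) →
      nr = base + ((l.map (fun s => pvRound state s)).countP (fun x => decide (∀ k ∈ K, k < x)) : Int) →
      (K.foldl (fun (acc : PySem.Dict String Int × Int) k =>
          ((l.filter (fun s => pvRound state s == k)).foldl (fun d s => d.insert s acc.2) acc.1,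
           acc.2 + (((l.filter (fun s => pvRound state s == k)).length : Int)))) (P, nr)).1
      = K.foldl (fun (P : PySem.Dict String Int) k =>
          (l.filter (fun s => pvRound state s == k)).foldl
            (fun d s => d.insert s (base +
              (((l.map (fun t => pvRound state t)).countP (fun x => decide (pvRound state s < x)) : Nat) : Int))) P) P := by
  intro K
  induction K with
  | nil => intro P nr _ _ _; simp
  | cons k K ih =>
    intro P nr hpw hmem hnr
    obtain ⟨hhead, htl⟩ := List.pairwise_cons.mp hpw
    simp only [List.foldl_cons]
    have hinner : (l.filter (fun s => pvRound state s == k)).foldl (fun d s => d.insert s nr) P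
        = (l.filter (fun s => pvRound state s == k)).foldl
            (fun d s => d.insert s (base +
              (((l.map (fun t => pvRound state t)).countP (fun x => decide (pvRound state s < x)) : Nat) : Int))) P := by
      apply PySem.List.foldl_congr_mem
      intro acc s hs
      have hrs : pvRound state s = k := by simpa using (List.mem_filter.mp hs).2
      have hcnt : (l.map (fun t => pvRound state t)).countP (fun x => decide (∀ k' ∈ k :: K, k' < x))
          = (l.map (fun t => pvRound state t)).countP (fun x => decide (pvRound state s < x)) := by
        apply List.countP_congr
        intro x _
        simp only [decide_eq_true_eq, hrs]
        constructor
        · intro h; exact h k (by simp)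
        · intro h k' hk'
          rcases List.mem_cons.mp hk' with rfl | hk'
          · exact h
          · exact lt_trans (hhead k' hk') h
      rw [hnr, hcnt]
    rw [hinner]
    apply ih
    · exact htl
    · intro x hx
      rcases hmem x hx with hxK | hbeyond
      · rcases List.mem_cons.mp hxK with rfl | hxK
        · right; intro k' hk'; exact hhead k' hk'
        · left; exact hxK
      · right; intro k' hk'; exact hbeyond k' (by simp [hk'])
    · have hstep : (l.map (fun s => pvRound state s)).countP (fun x => decide (∀ k' ∈ K, k' < x))
          = (l.map (fun s => pvRound state s)).countP (fun x => decide (∀ k' ∈ k :: K, k' < x))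
            + (l.map (fun s => pvRound state s)).countP (fun x => x == k) := by
        rw [← pvCountPDisjoint]
        · apply List.countP_congr
          intro x hx
          simp only [Bool.or_eq_true, decide_eq_true_eq, beq_iff_eq]
          constructor
          · intro h
            by_cases hxk : x = k
            · right; exact hxk
            · left
              rcases hmem x hx with hxK | hbeyond
              · rcases List.mem_cons.mp hxK with rfl | hxK
                · exact absurd rfl hxk
                · exact absurd (h x hxK) (lt_irrefl x)
              · intro k' hk'; exact hbeyond k' hk'
          · intro h k' hk'
            rcases h with h | rfl
            · exact h k' (List.mem_cons_of_mem _ hk')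
            · exact hhead k' hk'
        · intro x _
          rintro ⟨h1, h2⟩
          simp only [decide_eq_true_eq] at h1
          simp only [beq_iff_eq] at h2
          subst h2
          exact absurd (h1 _ (by simp)) (lt_irrefl _)
      have hlen : (l.filter (fun s => pvRound state s == k)).length
          = (l.map (fun s => pvRound state s)).countP (fun x => x == k) := by
        rw [List.countP_map, ← List.countP_eq_length_filter]
        rfl
      rw [hnr, hstep, hlen]
      push_cast
      ring

-- The whole equivalence.
theorem assign_placements_eq (state : List (String × List (String × Int))) (lobby_sids : List String) :
    assign_placements state lobby_sids = assign_placements_alt state lobby_sids := by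
  simp only [assign_placements, assign_placements_alt]
  rw [pvLoopB state lobby_sids (PySem.Dict.mk []) []]
  simp only [List.nil_append]
  set elimL := lobby_sids.filter (fun s => pvElim state s != 0) with helim
  set survL := lobby_sids.filter (fun s => !(pvElim state s != 0)) with hsurv
  set K := PySem.List.sorted
      ((elimL.foldl (fun d s => d.modify (pvRound state s) [] (fun b => b ++ [s])) (PySem.Dict.mk [])).keys)
      (fun r => r) true with hK
  have hkeys : (elimL.foldl (fun d s => d.modify (pvRound state s) [] (fun b => b ++ [s]))
      (PySem.Dict.mk [])).keys = PySem.Set.ofList (elimL.map (fun s => pvRound state s)) :=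
    pvByRoundKeys state elimL
  have hKpw : K.Pairwise (· > ·) := by
    have h1 := PySem.List.sorted_pairwise_rev
      ((elimL.foldl (fun d s => d.modify (pvRound state s) [] (fun b => b ++ [s])) (PySem.Dict.mk [])).keys)
      (fun r => r)
    have hnd : K.Nodup := by
      rw [hK, hkeys] at *
      exact ((PySem.List.sorted_perm _ _ _).nodup_iff).mpr (PySem.Set.nodup_ofList _)
    have := (h1.and hnd)
    exact this.imp (fun {a b} h => lt_of_le_of_ne h.1 (Ne.symm h.2))
  have hKmem : ∀ x ∈ elimL.map (fun s => pvRound state s), x ∈ K := by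
    intro x hx
    rw [hK, PySem.List.mem_sorted, hkeys, PySem.Set.mem_ofList]
    exact hx
  have hbase : (survL.length : Int) + 1
      = 1 + (lobby_sids.length : Int) - (elimL.length : Int) := by
    have := pvLenSplit state lobby_sids
    rw [← hsurv, ← helim] at this
    omega
  -- B's sorted eliminated list is the concatenation of A's buckets
  have hsortflat := pvSortedFlatMap (fun s => pvRound state s) elimL K hKpw
    (fun s hs => hKmem _ (List.mem_map_of_mem hs))
  rw [hsortflat, ← hbase]
  -- rewrite A's buckets
  simp only [pvByRoundGetD state elimL]
  rw [List.foldl_flatMap]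
  apply congrArg PySem.Dict.items
  apply pvLoopAB state elimL ((survL.length : Int) + 1) K _ _ hKpw
    (fun x hx => Or.inl (hKmem x hx))
  have hzero : (elimL.map (fun s => pvRound state s)).countP (fun x => decide (∀ k ∈ K, k < x)) = 0 := by
    rw [List.countP_eq_zero]
    intro x hx
    simp only [decide_eq_true_eq]
    intro h
    exact absurd (h x (hKmem x hx)) (lt_irrefl x)
  rw [hzero]
  push_cast
  ring

-- ===== VERDICT (by name: the statement is the Claim_ definition above) =====
theorem assign_placements_spec : Claim_equal_assign_placements := by
  intro state lobby_sids _ _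
  unfold Spec_assign_placements
  exact assign_placements_eq state lobby_sids
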